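-- pv_equiv track=rewrite | github.com/humancipher/Programming_Contest | Programming_Contest/AtCoder/ABC/ABC_100-199/ABC_110-119/ABC_114/ABC_114_D.py | solve
-- ===== SOURCE A (Python) =====
-- from bisect import bisect_left
--
-- def fact(n): #nの素因数分解
--     x = n
--     a = 2
--     Ans = dict()
--     while a**2 <= x and n > 1:
--         if n % a == 0:
--             Ans[a] = 1
--             n //= a
--             while n % a == 0:
--                 Ans[a] += 1
--                 n //= a
--         a += 1
--     if n > 1:
--         Ans[n] = 1
--     return Ans
--
-- def Fact(n): #n!の素因数分解
--     Ans = dict()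
--     for i in range(2,n+1):
--         Tmp = fact(i)
--         for t in Tmp:
--             if t in Ans:
--                 Ans[t] += Tmp[t]
--             else:
--                 Ans[t] = Tmp[t]
--     return Ans
--
-- def solve(n):
--     A = Fact(n)
--     P = []
--     for a in A:
--         P.append(A[a]+1)
--     P.sort()
--     ans = 0
--     ans += len(P) - bisect_left(P,75) #75個以上のやつを1個選ぶパターン
--     ans += (len(P) - bisect_left(P,25)) * (len(P) - bisect_left(P,3) - 1) #25個以上のやつ1個と3以上のやつを1個選ぶパターン
--     ans += (len(P) - bisect_left(P,15)) * (len(P) - bisect_left(P,5) - 1) #15以上のやつ1個と3以上のやつを1個選ぶパターン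
--     ans += (len(P) - bisect_left(P,5)) * (len(P) - bisect_left(P,5) - 1) * (len(P) - bisect_left(P,3) - 2) // 2 #5以上のやつを2個と3以上のやつを1個選ぶパターン
--     return ans
-- ===== SOURCE B (Python) =====
-- def solve(n):
--     # Sieve of Eratosthenes for the primes up to n; exponent of each prime p in n!
--     # by Legendre's formula (sum of n // p**k); then count exponents+1 against the
--     # 75-divisor thresholds directly, without sorting.
--     if n < 2:
--         return 0
--     composite = set()
--     counts = []
--     for p in range(2, n + 1):
--         if p not in composite:
--             for m in range(2 * p, n + 1, p):
--                 composite.add(m)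
--             e = 0
--             q = p
--             while q <= n:
--                 e += n // q
--                 q *= p
--             counts.append(e + 1)
--
--     def c(t):
--         s = 0
--         for v in counts:
--             if v >= t:
--                 s += 1
--         return s
--
--     c3, c5, c15, c25, c75 = c(3), c(5), c(15), c(25), c(75)
--     return c75 + c25 * (c3 - 1) + c15 * (c5 - 1) + c5 * (c5 - 1) * (c3 - 2) // 2
-- ===== Notes on version B (the rewrite author's own statement) =====
-- stated objective: faster
-- what changed: A factors every i in 2..n by trial division and merges the factorizations of n! into a dict, then sorts exponents and uses bisect; B sieves the primes up to n, gets each prime's exponent in n! directly by Legendre's formula (sum of n//p^k), and counts exponents against the thresholds without sorting.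
import Mathlib
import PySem

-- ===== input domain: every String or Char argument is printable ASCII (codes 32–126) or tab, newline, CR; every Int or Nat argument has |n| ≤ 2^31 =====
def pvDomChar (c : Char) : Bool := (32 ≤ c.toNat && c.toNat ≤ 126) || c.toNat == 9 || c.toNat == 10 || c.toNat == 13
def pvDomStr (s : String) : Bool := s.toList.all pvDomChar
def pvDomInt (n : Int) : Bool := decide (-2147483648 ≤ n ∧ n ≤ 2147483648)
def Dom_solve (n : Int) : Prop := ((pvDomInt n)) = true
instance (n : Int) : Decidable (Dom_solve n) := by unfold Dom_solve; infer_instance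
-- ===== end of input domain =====

-- B replaces A's per-i trial division with a prime sieve + Legendre's formula and counts
-- thresholds without sorting (objective: faster).


-- ===== PORT A =====

-- inner `while n % a == 0: Ans[a] += 1; n //= a` of fact; the extra conjuncts
-- 0 < n, 2 ≤ a only make the recursion total (Python would not terminate without them)
def factInner (a n : Int) (d : PySem.Dict Int Int) : Int × PySem.Dict Int Int :=
  if h : PySem.Int.mod n a = 0 ∧ 0 < n ∧ 2 ≤ a then
    factInner a (PySem.Int.floordiv n a) (d.insert a (d.getD a 0 + 1))
  else (n, d)
termination_by n.toNat
decreasing_by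
  have h2 : PySem.Int.floordiv n a = n / a := PySem.Int.floordiv_eq_ediv_of_pos (by omega)
  have h3 : n / a < n := by rw [Int.ediv_lt_iff_lt_mul (by omega)]; nlinarith [h.2.1, h.2.2]
  rw [h2]; omega

-- outer `while a**2 <= x and n > 1` of fact
def factOuter (a x n : Int) (d : PySem.Dict Int Int) : Int × PySem.Dict Int Int :=
  if h : a * a ≤ x ∧ 1 < n then
    if PySem.Int.mod n a = 0 then
      let p := factInner a (PySem.Int.floordiv n a) (d.insert a 1)
      factOuter (a + 1) x p.1 p.2
    else
      factOuter (a + 1) x n d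
  else (n, d)
termination_by (x + 1 - a).toNat
decreasing_by
  all_goals
    have ha : a ≤ x := by nlinarith [h.1, sq_nonneg a, sq_nonneg (a - 1)]
    omega

def fact (n : Int) : PySem.Dict Int Int :=
  let p := factOuter 2 n n PySem.Dict.empty
  if 1 < p.1 then p.2.insert p.1 1 else p.2

def FactD (n : Int) : PySem.Dict Int Int :=
  (PySem.List.pyRange 2 (n + 1) 1).foldl (fun ans i =>
    let tmp := fact i
    tmp.keys.foldl (fun ans t =>
      if ans.contains t then ans.insert t (ans.getD t 0 + tmp.getD t 0)
      else ans.insert t (tmp.getD t 0)) ans) PySem.Dict.empty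

def solve (n : Int) : Int :=
  let A := FactD n
  let P := A.keys.foldl (fun p a => p ++ [A.getD a 0 + 1]) []
  let P := PySem.List.sorted P (fun x => x) false
  let L : Int := PySem.List.len P
  let ans : Int := 0
  let ans := ans + (L - (PySem.List.bisectLeft P 75 : Int))
  let ans := ans + (L - (PySem.List.bisectLeft P 25 : Int)) * (L - (PySem.List.bisectLeft P 3 : Int) - 1)
  let ans := ans + (L - (PySem.List.bisectLeft P 15 : Int)) * (L - (PySem.List.bisectLeft P 5 : Int) - 1)
  let ans := ans + PySem.Int.floordiv
    ((L - (PySem.List.bisectLeft P 5 : Int)) * (L - (PySem.List.bisectLeft P 5 : Int) - 1)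
      * (L - (PySem.List.bisectLeft P 3 : Int) - 2)) 2
  ans

-- ===== PORT B =====

-- `e = 0; q = p;  while q <= n: e += n // q; q *= p` — Legendre's formula loop;
-- the conjuncts 2 ≤ p, 1 ≤ q only make the recursion total
def legLoop (n q p e : Int) : Int :=
  if hq : q ≤ n ∧ 2 ≤ p ∧ 1 ≤ q then
    legLoop n (q * p) p (e + PySem.Int.floordiv n q)
  else e
termination_by (n + 1 - q).toNat
decreasing_by
  have : q + q ≤ q * p := by nlinarith [hq.2.1, hq.2.2]
  omega

-- count of values ≥ t in counts:  `for v in counts: if v >= t: s += 1`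
def cntGe (counts : List Int) (t : Int) : Int :=
  counts.foldl (fun s v => if t ≤ v then s + 1 else s) 0

def solve_alt (n : Int) : Int :=
  if n < 2 then 0 else
  let st := (PySem.List.pyRange 2 (n + 1) 1).foldl (fun (st : PySem.Set Int × List Int) p =>
    if p ∈ st.1 then st
    else
      (((PySem.List.pyRange (2 * p) (n + 1) p).foldl (fun s m => PySem.Set.add s m) st.1),
        st.2 ++ [legLoop n p p 0 + 1])) (([] : PySem.Set Int), ([] : List Int))
  let counts := st.2
  let c3 := cntGe counts 3
  let c5 := cntGe counts 5
  let c15 := cntGe counts 15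
  let c25 := cntGe counts 25
  let c75 := cntGe counts 75
  c75 + c25 * (c3 - 1) + c15 * (c5 - 1) + PySem.Int.floordiv (c5 * (c5 - 1) * (c3 - 2)) 2

-- ===== PRECONDITION & SPEC =====
def Spec_solve (n : Int) (out : Int) : Prop := out = solve_alt n
instance (n : Int) (out : Int) : Decidable (Spec_solve n out) := by unfold Spec_solve; infer_instance

-- ===== CLAIM (what is proved, stated in full; the proofs are below) =====
def Claim_equal_solve : Prop := ∀ (n : Int), Dom_solve n → Spec_solve n (solve n)

-- ===== LEMMAS AND PROOFS =====

-- primes ≤ k, ascending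
def primesLe (k : Nat) : List Nat := (List.range (k+1)).filter (fun q => decide (Nat.Prime q))
-- prime factors of m, ascending
def primeFacs (m : Nat) : List Nat := (List.range (m+1)).filter (fun q => decide (Nat.Prime q ∧ q ∣ m))

lemma mem_primesLe {q k : Nat} : q ∈ primesLe k ↔ q.Prime ∧ q ≤ k := by
  simp [primesLe, and_comm]

lemma mem_primeFacs {q m : Nat} (hm : 1 ≤ m) : q ∈ primeFacs m ↔ q.Prime ∧ q ∣ m := by
  constructor
  · intro h; simp [primeFacs] at h; exact h.2
  · intro h; simp [primeFacs]
    exact ⟨Nat.le_of_dvd hm h.2, h⟩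

lemma nodup_primesLe (k : Nat) : (primesLe k).Nodup := List.Nodup.filter _ List.nodup_range
lemma nodup_primeFacs (m : Nat) : (primeFacs m).Nodup := List.Nodup.filter _ List.nodup_range

lemma primesLe_succ (k : Nat) :
    primesLe (k+1) = primesLe k ++ if (k+1).Prime then [k+1] else [] := by
  simp only [primesLe, List.range_succ, List.filter_append]
  split_ifs with h <;> simp [h]

-- generic: extract the least passing element from a filtered range
lemma filter_range_least {N a : Nat} {P Q : Nat → Bool} (haN : a < N) (hPa : P a = true)
    (hQa : Q a = false) (hlow : ∀ q, q < a → P q = false ∧ Q q = false)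
    (hhigh : ∀ q, a < q → P q = Q q) :
    (List.range N).filter P = a :: (List.range N).filter Q := by
  have hsplit : N = a + 1 + (N - (a+1)) := by omega
  rw [hsplit, List.range_add, List.filter_append, List.filter_append,
    List.range_succ, List.filter_append, List.filter_append]
  have h1 : (List.range a).filter P = [] := by
    apply List.filter_eq_nil_iff.mpr
    intro q hq; simp at hq; simp [(hlow q hq).1]
  have h2 : (List.range a).filter Q = [] := by
    apply List.filter_eq_nil_iff.mpr
    intro q hq; simp at hq; simp [(hlow q hq).2]
  have h3 : (List.map (fun x => a + 1 + x) (List.range (N - (a+1)))).filter P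
      = (List.map (fun x => a + 1 + x) (List.range (N - (a+1)))).filter Q := by
    apply List.filter_congr
    intro q hq; simp at hq; obtain ⟨x, _, rfl⟩ := hq
    exact hhigh _ (by omega)
  simp [h1, h2, h3, hPa, hQa]
lemma primeFacs_of_prime {m : Nat} (hm : m.Prime) : primeFacs m = [m] := by
  have h := filter_range_least (N := m+1) (a := m) (P := fun q => decide (Nat.Prime q ∧ q ∣ m))
    (Q := fun _ => false) (by omega) (by simp [hm]) rfl
    (fun q hq => ⟨by
      simp only [decide_eq_false_iff_not]
      rintro ⟨hqp, hqd⟩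
      rcases (Nat.Prime.eq_one_or_self_of_dvd hm q hqd) with h | h
      · exact absurd h hqp.ne_one
      · omega, rfl⟩)
    (fun q hq => by
      simp only [decide_eq_false_iff_not]
      rintro ⟨hqp, hqd⟩
      exact absurd (Nat.le_of_dvd hm.pos hqd) (by omega))
  simpa [primeFacs] using h
-- least prime factor peeled off
lemma primeFacs_one : primeFacs 1 = [] := by decide

-- least prime factor peeled off
lemma primeFacs_least {m a : Nat} (hm : 2 ≤ m) (ha : a.Prime) (hdvd : a ∣ m)
    (hleast : ∀ q : Nat, q.Prime → q ∣ m → a ≤ q) :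
    primeFacs m = a :: primeFacs (m / a ^ m.factorization a) := by
  have hm0 : m ≠ 0 := by omega
  set m' := m / a ^ m.factorization a with hm'
  have hm'dvd : m' ∣ m := Nat.ordCompl_dvd m a
  have hm'pos : 0 < m' := Nat.ordCompl_pos a hm0
  have hfac : m'.factorization = m.factorization.erase a := Nat.factorization_ordCompl m a
  have key : (List.range (m+1)).filter (fun q => decide (Nat.Prime q ∧ q ∣ m))
      = a :: (List.range (m+1)).filter (fun q => decide (Nat.Prime q ∧ q ∣ m')) := by
    apply filter_range_least (a := a)
    · have := Nat.le_of_dvd (by omega) hdvd; omega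
    · simp [ha, hdvd]
    · simp only [decide_eq_false_iff_not]
      rintro ⟨-, hd⟩
      exact Nat.not_dvd_ordCompl ha hm0 hd
    · intro q hq
      constructor <;> simp only [decide_eq_false_iff_not] <;> rintro ⟨hqp, hqd⟩
      · exact absurd (hleast q hqp hqd) (by omega)
      · exact absurd (hleast q hqp (hqd.trans hm'dvd)) (by omega)
    · intro q hq
      have hne : q ≠ a := by omega
      simp only [decide_eq_decide]
      constructor <;> rintro ⟨hqp, hqd⟩ <;> refine ⟨hqp, ?_⟩
      · rw [hqp.dvd_iff_one_le_factorization (by omega), hfac, Finsupp.erase_ne hne]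
        exact (hqp.dvd_iff_one_le_factorization hm0).mp hqd
      · exact hqd.trans hm'dvd
  rw [primeFacs, key]
  congr 1
  -- shrink the range bound from m+1 to m'+1
  have : ∀ M, m' + 1 ≤ M → M ≤ m + 1 → (List.range M).filter (fun q => decide (Nat.Prime q ∧ q ∣ m')) = primeFacs m' := by
    intro M h1 h2
    induction M with
    | zero => omega
    | succ M ih =>
      rcases Nat.lt_or_ge m' M with h | h
      · rw [List.range_succ, List.filter_append, ih (by omega) (by omega)]
        have : ¬ (Nat.Prime M ∧ M ∣ m') := by
          rintro ⟨-, hd⟩; exact absurd (Nat.le_of_dvd hm'pos hd) (by omega)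
        simp [this]
      · have : M = m' := by omega
        subst this; rfl
  exact this (m+1) (by have := Nat.le_of_dvd (by omega) hm'dvd; omega) le_rfl
lemma factInner_spec (a : Nat) (ha : a.Prime) : ∀ (m : Nat), 1 ≤ m → ∀ (d : PySem.Dict Int Int),
    factInner ↑a ↑m d = (↑(m / a ^ m.factorization a),
      if m.factorization a = 0 then d
      else d.insert ↑a (d.getD ↑a 0 + ↑(m.factorization a))) := by
  have ha2 : 2 ≤ a := ha.two_le
  intro m
  induction m using Nat.strong_induction_on with
  | _ m ih =>
    intro hm d
    by_cases hdvd : a ∣ m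
    · have hma : a ≤ m := Nat.le_of_dvd (by omega) hdvd
      have hv1 : 1 ≤ m.factorization a := (ha.dvd_iff_one_le_factorization (by omega)).mp hdvd
      have hcond : PySem.Int.mod ↑m ↑a = 0 ∧ 0 < ((m:Nat) : Int) ∧ 2 ≤ ((a:Nat) : Int) := by
        refine ⟨?_, by exact_mod_cast Nat.lt_of_lt_of_le (by omega) hma, by exact_mod_cast ha2⟩
        rw [PySem.Int.mod_eq_zero_iff_dvd]; exact_mod_cast hdvd
      rw [factInner, dif_pos hcond, PySem.Int.floordiv_natCast m a]
      have hlt : m / a < m := Nat.div_lt_self (by omega) (by omega)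
      have hm1 : 1 ≤ m / a := (Nat.one_le_div_iff (by omega)).mpr hma
      have hfd : (m / a).factorization a = m.factorization a - 1 := by
        rw [Nat.factorization_div hdvd]
        simp [ha.factorization_self]
      have hdd : m / a / a ^ (m.factorization a - 1) = m / a ^ m.factorization a := by
        rw [Nat.div_div_eq_div_mul]
        congr 1
        rw [← pow_succ']
        congr 1
        omega
      rw [ih _ hlt hm1, hfd, hdd]
      rcases Nat.eq_or_lt_of_le hv1 with h1 | h1
      · rw [if_pos (by omega), if_neg (by omega), ← h1]
        norm_num
      · rw [if_neg (by omega), if_neg (by omega)]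
        rw [PySem.Dict.getD_insert_self, PySem.Dict.insert_insert_self]
        congr 2
        omega
    · have hv : m.factorization a = 0 := Nat.factorization_eq_zero_of_not_dvd hdvd
      rw [factInner, dif_neg (by
        rintro ⟨hmod, -, -⟩
        rw [PySem.Int.mod_eq_zero_iff_dvd] at hmod
        exact hdvd (by exact_mod_cast hmod))]
      rw [hv]
      simp
lemma factOuter_exit (a x n : Int) (d : PySem.Dict Int Int)
    (hcond : ¬(a * a ≤ x ∧ 1 < n)) (hx : n ≤ x) (hn : 1 ≤ n) (ha : 2 ≤ a)
    (hfac : ∀ q : Nat, q.Prime → (q:Int) ∣ n → a ≤ (q:Int))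
    (hkeys : ∀ k ∈ d.keys, k < a) :
    ((if 1 < (factOuter a x n d).1 then (factOuter a x n d).2.insert (factOuter a x n d).1 1
      else (factOuter a x n d).2).items
      = d.items ++ (primeFacs n.toNat).map (fun (p : Nat) => ((p:Int), (n.toNat.factorization p : Int)))) := by
  rw [factOuter, dif_neg hcond]
  dsimp only
  rcases eq_or_lt_of_le hn with h1 | h1
  · rw [if_neg (by omega)]
    rw [show n.toNat = 1 by omega, primeFacs_one]
    simp
  · have hax : x < a * a := by
      by_contra h
      exact hcond ⟨by omega, h1⟩
    set m := n.toNat with hmdef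
    have hmn : (m : Int) = n := by omega
    have hm2 : 2 ≤ m := by omega
    have hq := Nat.minFac_prime (n := m) (by omega)
    have hqd : m.minFac ∣ m := Nat.minFac_dvd m
    have haq : a ≤ (m.minFac : Int) := hfac _ hq (by rw [← hmn]; exact_mod_cast hqd)
    have hprime : m.Prime := by
      by_contra hnp
      have h2 : m / m.minFac ≠ 1 := by
        intro he
        have hh : m.minFac * (m / m.minFac) = m := Nat.mul_div_cancel' hqd
        rw [he, Nat.mul_one] at hh
        exact hnp (hh ▸ hq)
      have hdpos : 1 ≤ m / m.minFac := (Nat.one_le_div_iff hq.pos).mpr (Nat.minFac_le (by omega))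
      have hr := Nat.minFac_prime h2
      have hrd : (m / m.minFac).minFac ∣ m := (Nat.minFac_dvd _).trans (Nat.div_dvd_of_dvd hqd)
      have har : a ≤ ((m / m.minFac).minFac : Int) := hfac _ hr (by rw [← hmn]; exact_mod_cast hrd)
      have hrle : (m / m.minFac).minFac ≤ m / m.minFac := Nat.minFac_le (by omega)
      have hmul : m.minFac * (m / m.minFac) = m := Nat.mul_div_cancel' hqd
      have h3 : ((m.minFac : Int)) * ((m / m.minFac : Nat) : Int) = (m : Int) := by exact_mod_cast hmul
      have h4 : ((m / m.minFac).minFac : Int) ≤ ((m / m.minFac : Nat) : Int) := by exact_mod_cast hrle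
      nlinarith [hmn ▸ hx]
    rw [if_pos h1]
    have hfree : d.contains n = false := by
      rw [PySem.Dict.contains_eq_decide_mem_keys, decide_eq_false_iff_not]
      intro hmem
      have := hkeys _ hmem
      have : a ≤ n := le_trans haq (by rw [← hmn]; exact_mod_cast Nat.le_of_dvd (by omega) hqd)
      omega
    rw [PySem.Dict.items_insert_of_not_contains _ _ hfree]
    rw [primeFacs_of_prime hprime]
    simp [hmn, hprime.factorization_self]

lemma factOuter_full : ∀ (K : Nat) (a x n : Int) (d : PySem.Dict Int Int),
    (x + 1 - a).toNat ≤ K → n ≤ x → 1 ≤ n → 2 ≤ a →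
    (∀ q : Nat, q.Prime → (q:Int) ∣ n → a ≤ (q:Int)) →
    (∀ k ∈ d.keys, k < a) →
    ((if 1 < (factOuter a x n d).1 then (factOuter a x n d).2.insert (factOuter a x n d).1 1
      else (factOuter a x n d).2).items
      = d.items ++ (primeFacs n.toNat).map (fun (p : Nat) => ((p:Int), (n.toNat.factorization p : Int)))) := by
  intro K
  induction K with
  | zero =>
    intro a x n d hK hx hn ha hfac hkeys
    apply factOuter_exit a x n d ?_ hx hn ha hfac hkeys
    rintro ⟨h1, h2⟩
    have : x < a := by omega
    nlinarith
  | succ K ih =>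
    intro a x n d hK hx hn ha hfac hkeys
    by_cases hcond : a * a ≤ x ∧ 1 < n
    · obtain ⟨hc1, hc2⟩ := hcond
      have hax : a ≤ x := by nlinarith
      by_cases hdvd : PySem.Int.mod n a = 0
      · -- a divides n: a is the least prime factor
        rw [factOuter, dif_pos ⟨hc1, hc2⟩, if_pos hdvd]
        rw [PySem.Int.mod_eq_zero_iff_dvd] at hdvd
        set A := a.toNat with hAdef
        set m := n.toNat with hmdef
        have hacast : (A : Int) = a := by omega
        have hmcast : (m : Int) = n := by omega
        have hm2' : 2 ≤ m := by omega
        have hAdvd : A ∣ m := by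
          have : (A:Int) ∣ (m:Int) := by rw [hacast, hmcast]; exact hdvd
          exact_mod_cast this
        have hA2 : 2 ≤ A := by omega
        have hAprime : A.Prime := by
          rw [Nat.prime_def]
          refine ⟨hA2, fun c hc => ?_⟩
          by_contra hc1'
          rw [not_or] at hc1'
          have hc0 : c ≠ 0 := by rintro rfl; simp at hc; omega
          have hcp := Nat.minFac_prime (n := c) (by tauto)
          have hcd : c.minFac ∣ m := ((Nat.minFac_dvd c).trans hc).trans hAdvd
          have h5 : a ≤ (c.minFac : Int) := hfac _ hcp (by rw [← hmcast]; exact_mod_cast hcd)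
          have h6 : c.minFac ≤ c := Nat.minFac_le (by omega)
          have h7 : c ≤ A := Nat.le_of_dvd (by omega) hc
          have : A ≤ c.minFac := by exact_mod_cast hacast ▸ h5
          have : c = A := by omega
          tauto
        have hv1 : 1 ≤ m.factorization A := (hAprime.dvd_iff_one_le_factorization (by omega)).mp hAdvd
        have hfl : PySem.Int.floordiv n a = ((m / A : Nat) : Int) := by
          rw [← hacast, ← hmcast]; exact PySem.Int.floordiv_natCast m A
        have hmA : A ≤ m := Nat.le_of_dvd (by omega) hAdvd
        have hm1 : 1 ≤ m / A := (Nat.one_le_div_iff (by omega)).mpr hmA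
        have hfd : (m / A).factorization A = m.factorization A - 1 := by
          rw [Nat.factorization_div hAdvd]
          simp [hAprime.factorization_self]
        have hinner := factInner_spec A hAprime (m / A) hm1 (d.insert a 1)
        rw [hacast] at hinner
        rw [hfl, hinner, hfd]
        have hdd : m / A / A ^ (m.factorization A - 1) = m / A ^ m.factorization A := by
          rw [Nat.div_div_eq_div_mul]
          congr 1
          rw [← pow_succ']
          congr 1
          omega
        rw [hdd]
        set m' := m / A ^ m.factorization A with hm'def
        have hm'pos : 0 < m' := Nat.ordCompl_pos A (by omega)
        have hm'dvd : m' ∣ m := Nat.ordCompl_dvd m A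
        have hm'lem : m' ≤ m := Nat.le_of_dvd (by omega) hm'dvd
        have hm'le : (m' : Int) ≤ x := le_trans (by rw [← hmcast]; exact_mod_cast hm'lem) hx
        have hm'fac : ∀ q : Nat, q.Prime → (q:Int) ∣ (m' : Int) → a + 1 ≤ (q:Int) := by
          intro q hqp hqd
          have hqd' : q ∣ m' := by exact_mod_cast hqd
          have h8 : a ≤ (q : Int) := hfac _ hqp (by rw [← hmcast]; exact_mod_cast hqd'.trans hm'dvd)
          have h9 : q ≠ A := by
            rintro rfl
            exact Nat.not_dvd_ordCompl hAprime (by omega) hqd'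
          have : (q:Int) ≠ a := by rw [← hacast]; exact_mod_cast h9
          omega
        -- the dict after this step is d.insert a ↑(m.factorization A), in both if-branches
        have hstep : (if m.factorization A - 1 = 0 then d.insert a 1
            else (d.insert a 1).insert a ((d.insert a 1).getD a 0 + ↑(m.factorization A - 1)))
            = d.insert a ((m.factorization A : Nat) : Int) := by
          split_ifs with h0
          · rw [show m.factorization A = 1 by omega]
            norm_num
          · rw [PySem.Dict.getD_insert_self, PySem.Dict.insert_insert_self]
            congr 1
            omega
        rw [hstep]
        have hkeys' : ∀ k ∈ (d.insert a ((m.factorization A : Nat) : Int)).keys, k < a + 1 := by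
          intro k hk
          rw [PySem.Dict.mem_keys_insert] at hk
          rcases hk with rfl | hk
          · omega
          · have := hkeys _ hk; omega
        have hKrec : (x + 1 - (a + 1)).toNat ≤ K := by omega
        have hres := ih (a + 1) x (↑m') (d.insert a ((m.factorization A : Nat) : Int)) hKrec hm'le
          (by exact_mod_cast hm'pos) (by omega) hm'fac hkeys'
        rw [Int.toNat_natCast] at hres
        rw [hres]
        have hfresh : d.contains a = false := by
          rw [PySem.Dict.contains_eq_decide_mem_keys, decide_eq_false_iff_not]
          intro hmem
          exact absurd (hkeys _ hmem) (by omega)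
        rw [PySem.Dict.items_insert_of_not_contains _ _ hfresh]
        rw [primeFacs_least hm2' hAprime hAdvd ?hleast, ← hm'def]
        case hleast =>
          intro q hqp hqd'
          have := hfac _ hqp (by rw [← hmcast]; exact_mod_cast hqd')
          rw [← hacast] at this
          exact_mod_cast this
        · -- lists line up
          rw [List.map_cons, List.append_assoc, List.singleton_append, hacast]
          congr 2
          apply List.map_congr_left
          intro q hq
          rw [mem_primeFacs hm'pos] at hq
          congr 1
          have hq9 : q ≠ A := by
            rintro rfl
            exact Nat.not_dvd_ordCompl hAprime (by omega) hq.2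
          rw [hm'def, Nat.factorization_ordCompl m A, Finsupp.erase_ne hq9]
      · -- a does not divide n
        rw [factOuter, dif_pos ⟨hc1, hc2⟩, if_neg hdvd]
        apply ih (a+1) x n d (by omega) hx hn (by omega) ?_ (fun k hk => by have := hkeys k hk; omega)
        intro q hqp hqd
        have h8 := hfac q hqp hqd
        have : (q : Int) ≠ a := by
          rintro h9
          rw [PySem.Int.mod_eq_zero_iff_dvd] at hdvd
          exact hdvd (h9 ▸ hqd)
        omega
    · exact factOuter_exit a x n d hcond hx hn ha hfac hkeys

lemma fact_spec (m : Nat) (hm : 2 ≤ m) :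
    (fact ↑m).items = (primeFacs m).map (fun (p : Nat) => ((p:Int), (m.factorization p : Int))) := by
  have h := factOuter_full ((m:Int) + 1 - 2).toNat 2 ↑m ↑m PySem.Dict.empty le_rfl le_rfl
    (by exact_mod_cast Nat.one_le_iff_ne_zero.mpr (by omega)) le_rfl
    (fun q hq _ => by exact_mod_cast hq.two_le) (by simp [PySem.Dict.keys_empty])
  rw [Int.toNat_natCast] at h
  simpa [fact] using h


-- the merge loop `for t in Tmp: ...` over keys all already present in ans
lemma merge_fold (tmp : PySem.Dict Int Int) (g : Int → Int) :
    ∀ (ts : List Int), ts.Nodup → (∀ t ∈ ts, tmp.getD t 0 = g t) →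
    ∀ (ps : List Int) (f : Int → Int) (d : PySem.Dict Int Int), ps.Nodup →
    (∀ t ∈ ts, t ∈ ps) → d.items = ps.map (fun p => (p, f p)) →
    (ts.foldl (fun ans t =>
        if ans.contains t then ans.insert t (ans.getD t 0 + tmp.getD t 0)
        else ans.insert t (tmp.getD t 0)) d).items
      = ps.map (fun p => (p, f p + if p ∈ ts then g p else 0)) := by
  intro ts
  induction ts with
  | nil =>
    intro _ _ ps f d _ _ hd
    simpa using hd
  | cons t ts ih =>
    intro hnd hg ps f d hps hsub hd
    have hkeys : d.keys = ps := by
      show d.items.map (·.1) = ps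
      rw [hd, List.map_map]
      simp [Function.comp_def]
    have htps : t ∈ ps := hsub t (by simp)
    have hcont : d.contains t = true := by
      rw [PySem.Dict.contains_eq_decide_mem_keys, hkeys, decide_eq_true_eq]
      exact htps
    have hgetD : d.getD t 0 = f t := by
      apply PySem.Dict.getD_of_mem_items
      · rw [hd]
        exact List.mem_map_of_mem (by exact htps)
      · rw [hkeys]; exact hps
    rw [List.foldl_cons, if_pos hcont, hgetD]
    have hitems : (d.insert t (f t + tmp.getD t 0)).items
        = ps.map (fun p => (p, if p = t then f t + g t else f p)) := by
      rw [PySem.Dict.items_insert_of_contains _ _ hcont, hd, List.map_map, hg t (by simp)]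
      apply List.map_congr_left
      intro p hp
      by_cases hpt : p = t <;> simp [hpt]
    rw [ih hnd.of_cons (fun u hu => hg u (by simp [hu])) ps _ _ hps
      (fun u hu => hsub u (by simp [hu])) hitems]
    apply List.map_congr_left
    intro p hp
    by_cases hpt : p = t
    · subst hpt
      have hnots : p ∉ ts := (List.nodup_cons.mp hnd).1
      simp [hnots]
    · simp [hpt]

def factItems (k : Nat) : List (Int × Int) :=
  (primesLe k).map (fun (p : Nat) => ((p:Int), (k.factorial.factorization p : Int)))

lemma vfac_succ (N p : Nat) :
    (N+1).factorial.factorization p = N.factorial.factorization p + (N+1).factorization p := by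
  rw [Nat.factorial_succ, Nat.factorization_mul (by omega) (Nat.factorial_ne_zero N)]
  simp [add_comm]

lemma keys_of_items {d : PySem.Dict Int Int} {l : List (Int × Int)} (h : d.items = l) :
    d.keys = l.map (·.1) := by
  show d.items.map (·.1) = _
  rw [h]

lemma natCast_int_injective : Function.Injective (fun (q : Nat) => (q : Int)) :=
  fun _ _ h => by simpa using h

-- one pass of the `for i in range(2, n+1)` loop of Fact
lemma FactD_step (N : Nat) (h1 : 1 ≤ N) (ans : PySem.Dict Int Int)
    (hans : ans.items = factItems N) :
    ((fact ((((N+1):Nat) : Int))).keys.foldl (fun ans t =>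
        if ans.contains t then ans.insert t (ans.getD t 0 + (fact ((((N+1):Nat) : Int))).getD t 0)
        else ans.insert t ((fact ((((N+1):Nat) : Int))).getD t 0)) ans).items
      = factItems (N+1) := by
  set tmp := fact ((((N+1):Nat) : Int)) with htmpdef
  have hm2 : 2 ≤ N + 1 := by omega
  have htmp := fact_spec (N+1) hm2
  rw [← htmpdef] at htmp
  have htmpkeys : tmp.keys = (primeFacs (N+1)).map (fun (q:Nat) => (q : Int)) := by
    rw [keys_of_items htmp, List.map_map]
    simp [Function.comp_def]
  have htmpnodup : tmp.keys.Nodup := by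
    rw [htmpkeys]
    exact (nodup_primeFacs (N+1)).map natCast_int_injective
  have hgetD : ∀ q ∈ primeFacs (N+1), tmp.getD (↑q) 0 = ((N+1).factorization q : Int) := by
    intro q hq
    apply PySem.Dict.getD_of_mem_items
    · rw [htmp]
      exact List.mem_map_of_mem hq
    · exact htmpnodup
  have hanskeys : ans.keys = (primesLe N).map (fun (q:Nat) => (q : Int)) := by
    rw [keys_of_items (hans.trans rfl), factItems, List.map_map]
    simp [Function.comp_def]
  by_cases hp : (N+1).Prime
  · -- the new prime appends at the end
    have hfp : primeFacs (N+1) = [N+1] := primeFacs_of_prime hp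
    rw [htmpkeys, hfp]
    simp only [List.map_cons, List.map_nil, List.foldl_cons, List.foldl_nil]
    have hnotmem : ((((N+1):Nat) : Int)) ∉ ans.keys := by
      rw [hanskeys]
      intro hmem
      obtain ⟨q, hq1, hq2⟩ := List.mem_map.mp hmem
      have : q = N + 1 := by exact_mod_cast hq2
      subst this
      exact absurd (mem_primesLe.mp hq1).2 (by omega)
    have hcont : ans.contains ((((N+1):Nat) : Int)) = false := by
      rw [PySem.Dict.contains_eq_decide_mem_keys, decide_eq_false_iff_not]
      exact hnotmem
    rw [if_neg (by rw [hcont]; simp)]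
    rw [PySem.Dict.items_insert_of_not_contains _ _ hcont, hans]
    rw [hgetD (N+1) (by rw [hfp]; simp)]
    rw [factItems, factItems, primesLe_succ, if_pos hp, List.map_append]
    congr 1
    · apply List.map_congr_left
      intro q hq
      obtain ⟨hqp, hqle⟩ := mem_primesLe.mp hq
      have hqne : q ≠ N+1 := by omega
      rw [vfac_succ]
      rw [Nat.factorization_eq_zero_of_not_dvd (fun hdvd => hqne
        ((Nat.prime_dvd_prime_iff_eq hqp hp).mp hdvd))]
      simp
    · simp only [List.map_cons, List.map_nil]
      rw [vfac_succ, hp.factorization_self]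
      rw [Nat.factorization_eq_zero_of_not_dvd (fun hdvd => by
        have := (Nat.Prime.dvd_factorial hp).mp hdvd
        omega)]
  · -- composite: every prime factor is already a key
    rw [htmpkeys]
    have hsub : ∀ t ∈ (primeFacs (N+1)).map (fun (q:Nat) => (q : Int)),
        t ∈ (primesLe N).map (fun (q:Nat) => (q : Int)) := by
      intro t ht
      obtain ⟨q, hq1, rfl⟩ := List.mem_map.mp ht
      obtain ⟨hqp, hqd⟩ := (mem_primeFacs (by omega)).mp hq1
      have hqle : q ≤ N := by
        have h5 := Nat.le_of_dvd (by omega) hqd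
        rcases Nat.lt_or_ge q (N+1) with h6 | h6
        · omega
        · have : q = N + 1 := by omega
          subst this
          exact absurd hqp hp
      exact List.mem_map_of_mem (mem_primesLe.mpr ⟨hqp, hqle⟩)
    rw [merge_fold tmp (fun z => ((N+1).factorization z.toNat : Int)) _
      ((nodup_primeFacs (N+1)).map natCast_int_injective)
      (by
        intro t ht
        obtain ⟨q, hq1, rfl⟩ := List.mem_map.mp ht
        rw [hgetD q hq1]
        simp)
      ((primesLe N).map (fun (q:Nat) => (q : Int)))
      (fun z => (N.factorial.factorization z.toNat : Int)) ans
      ((nodup_primesLe N).map natCast_int_injective) hsub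
      (by
        rw [hans, factItems, List.map_map]
        apply List.map_congr_left
        intro q hq
        simp)]
    rw [factItems, primesLe_succ, if_neg hp, List.append_nil, List.map_map]
    apply List.map_congr_left
    intro q hq
    obtain ⟨hqp, hqle⟩ := mem_primesLe.mp hq
    simp only [Function.comp_def, Int.toNat_natCast]
    have hmem : (↑q : Int) ∈ (primeFacs (N+1)).map (fun (q:Nat) => (q : Int)) ↔ q ∈ primeFacs (N+1) :=
      List.mem_map_of_injective natCast_int_injective
    by_cases hdvd : q ∣ N + 1
    · rw [if_pos (hmem.mpr ((mem_primeFacs (by omega)).mpr ⟨hqp, hdvd⟩))]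
      rw [vfac_succ]
      push_cast
      ring
    · rw [if_neg (fun hc => hdvd ((mem_primeFacs (by omega)).mp (hmem.mp hc)).2)]
      rw [vfac_succ, Nat.factorization_eq_zero_of_not_dvd hdvd]
      simp

lemma FactD_items (N : Nat) (hN : 1 ≤ N) : (FactD (↑N : Int)).items = factItems N := by
  induction N with
  | zero => omega
  | succ N ihN =>
    rcases Nat.lt_or_ge N 1 with h1 | h1
    · have : N = 0 := by omega
      subst this
      decide
    · have hsplit : PySem.List.pyRange 2 ((((N+1) : Nat) : Int) + 1) 1
          = PySem.List.pyRange 2 ((N : Int) + 1) 1 ++ [(((N+1):Nat) : Int)] := by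
        push_cast
        exact PySem.List.pyRange_one_succ_right (by omega)
      rw [FactD, hsplit, List.foldl_append]
      rw [show ((PySem.List.pyRange 2 ((N:Int) + 1) 1).foldl _ PySem.Dict.empty) = FactD (↑N : Int) from rfl]
      simp only [List.foldl_cons, List.foldl_nil]
      exact FactD_step N h1 _ (ihN h1)

-- ===== B-side =====

lemma legLoop_sum (N p : Nat) (hp : 1 < p) (hN : 1 ≤ N) :
    ∀ (K j : Nat) (e : Int), 1 ≤ j → Nat.log p N + 1 ≤ j + K →
    legLoop ↑N ↑(p^j) ↑p e = e + ∑ i ∈ Finset.Ico j (Nat.log p N + 1), ((N / p^i : Nat) : Int) := by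
  intro K
  induction K with
  | zero =>
    intro j e hj hb
    rw [legLoop, dif_neg, Finset.Ico_eq_empty (by omega)]
    · simp
    · rintro ⟨hle, -, -⟩
      have h1 : p ^ j ≤ N := by exact_mod_cast hle
      have := (Nat.le_log_iff_pow_le hp (by omega)).mpr h1
      omega
  | succ K ih =>
    intro j e hj hb
    by_cases hle : p ^ j ≤ N
    · have hjlog : j ≤ Nat.log p N := (Nat.le_log_iff_pow_le hp (by omega)).mpr hle
      rw [legLoop, dif_pos ⟨by exact_mod_cast hle, by exact_mod_cast hp, by exact_mod_cast Nat.one_le_pow j p (by omega)⟩]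
      have hq : ((p^j : Nat) : Int) * ↑p = ((p^(j+1) : Nat) : Int) := by push_cast [pow_succ]; ring
      rw [PySem.Int.floordiv_natCast N (p^j), hq]
      have hih := ih (j+1) (e + ((N / p^j : Nat) : Int)) (by omega) (by omega)
      have hsum := Finset.sum_eq_sum_Ico_succ_bot (a := j) (b := Nat.log p N + 1)
        (by omega) (fun i => ((N / p^i : Nat) : Int))
      rw [hih, hsum]
      ring
    · rw [legLoop, dif_neg, Finset.Ico_eq_empty]
      · simp
      · intro hc
        exact hle ((Nat.le_log_iff_pow_le hp (by omega)).mp (by omega))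
      · rintro ⟨hc, -, -⟩
        exact hle (by exact_mod_cast hc)

lemma legLoop_eq (p : Nat) (hp : p.Prime) (N : Nat) (hN : 1 ≤ N) :
    legLoop ↑N ↑p ↑p 0 = (N.factorial.factorization p : Int) := by
  have h := legLoop_sum N p hp.one_lt hN (Nat.log p N + 1) 1 0 le_rfl (by omega)
  rw [pow_one] at h
  rw [h, Nat.factorization_factorial hp (b := Nat.log p N + 1) (by omega)]
  push_cast
  simp

-- the body of B's sieve loop (definitionally the lambda in solve_alt)
def sieveBody (n : Int) : (PySem.Set Int × List Int) → Int → (PySem.Set Int × List Int) :=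
  fun st p =>
    if p ∈ st.1 then st
    else (((PySem.List.pyRange (2 * p) (n + 1) p).foldl (fun s m => PySem.Set.add s m) st.1),
          st.2 ++ [legLoop n p p 0 + 1])

lemma sieve_inv (N : Nat) : ∀ (K : Nat), 1 ≤ K → K ≤ N →
    (∀ j : Int, j ∈ ((PySem.List.pyRange 2 ((K:Int)+1) 1).foldl (sieveBody ↑N) (([] : PySem.Set Int), ([] : List Int))).1 ↔
       ∃ q : Nat, q.Prime ∧ q ≤ K ∧ (q:Int) ∣ j ∧ 2*(q:Int) ≤ j ∧ j ≤ (N:Int))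
    ∧ ((PySem.List.pyRange 2 ((K:Int)+1) 1).foldl (sieveBody ↑N) (([] : PySem.Set Int), ([] : List Int))).2
       = (primesLe K).map (fun (q:Nat) => legLoop ↑N ↑q ↑q 0 + 1) := by
  intro K
  induction K with
  | zero => omega
  | succ K ih =>
    intro h1 hKN
    rcases Nat.lt_or_ge K 1 with hK0 | hK1
    · -- K = 0 : base, the range is [2,2) = []
      have : K = 0 := by omega
      subst this
      rw [show (((0+1:Nat)):Int) + 1 = 2 by norm_num, PySem.List.pyRange_one_eq_nil (by omega)]
      have hpl : primesLe (0+1) = [] := by decide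
      rw [hpl]
      constructor
      · intro j
        simp only [List.foldl_nil]
        constructor
        · intro h; simp at h
        · rintro ⟨q, hq, hle, -⟩
          exact absurd hq.two_le (by omega)
      · rfl
    · obtain ⟨ihm, ihc⟩ := ih hK1 (by omega)
      have hsplit : PySem.List.pyRange 2 (((K+1:Nat):Int)+1) 1
          = PySem.List.pyRange 2 ((K:Int)+1) 1 ++ [(((K+1):Nat) : Int)] := by
        push_cast
        exact PySem.List.pyRange_one_succ_right (by omega)
      rw [hsplit, List.foldl_append, List.foldl_cons, List.foldl_nil]
      set st := (PySem.List.pyRange 2 ((K:Int)+1) 1).foldl (sieveBody ↑N) (([] : PySem.Set Int), ([] : List Int)) with hstdef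
      have hmemtest : ((((K+1):Nat) : Int) ∈ st.1) ↔ ¬ (K+1).Prime := by
        rw [ihm]
        constructor
        · rintro ⟨q, hqp, hqle, hqdvd, -, -⟩ hpr
          have hqdvd' : q ∣ K+1 := by exact_mod_cast hqdvd
          rcases (Nat.Prime.eq_one_or_self_of_dvd hpr q hqdvd') with h | h
          · exact hqp.ne_one h
          · omega
        · intro hnp
          have hq := Nat.minFac_prime (n := K+1) (by omega)
          have hqd : (K+1).minFac ∣ K+1 := Nat.minFac_dvd _
          have hqne : (K+1).minFac ≠ K+1 := fun he => hnp (he ▸ hq)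
          have hqle : (K+1).minFac ≤ K := by
            have := Nat.le_of_dvd (by omega) hqd
            omega
          refine ⟨(K+1).minFac, hq, hqle, by exact_mod_cast hqd, ?_, by exact_mod_cast hKN⟩
          obtain ⟨c, hc⟩ := hqd
          have hc2 : 2 ≤ c := by
            rcases Nat.lt_or_ge c 2 with h | h
            · interval_cases c <;> omega
            · exact h
          have h2q : 2 * (K+1).minFac ≤ K + 1 := by
            calc 2 * (K+1).minFac = (K+1).minFac * 2 := by ring
              _ ≤ (K+1).minFac * c := Nat.mul_le_mul_left _ hc2
              _ = K + 1 := hc.symm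
          exact_mod_cast h2q
      by_cases hp : (K+1).Prime
      · rw [sieveBody, if_neg (by rw [hmemtest]; simpa using hp)]
        constructor
        · intro j
          rw [PySem.Set.mem_foldl_add (f := fun (b : Int) => b)]
          rw [ihm]
          have hppos : (0:Int) < ((K+1:Nat):Int) := by positivity
          constructor
          · rintro (⟨q, hqp, hqle, h3, h4, h5⟩ | ⟨b, hb, rfl⟩)
            · exact ⟨q, hqp, by omega, h3, h4, h5⟩
            · rw [PySem.List.mem_pyRange_iff_of_pos hppos] at hb
              obtain ⟨hb1, hb2, hb3⟩ := hb
              refine ⟨K+1, hp, le_refl _, ?_, by push_cast at hb1 ⊢; omega, by omega⟩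
              have h6 : (((K+1):Nat):Int) ∣ (2 * (((K+1):Nat):Int)) := dvd_mul_left _ 2
              simpa using dvd_add hb3 h6
          · rintro ⟨q, hqp, hqle, h3, h4, h5⟩
            rcases Nat.lt_or_ge q (K+1) with h6 | h6
            · exact Or.inl ⟨q, hqp, by omega, h3, h4, h5⟩
            · have : q = K+1 := by omega
              subst this
              right
              refine ⟨j, ?_, rfl⟩
              rw [PySem.List.mem_pyRange_iff_of_pos hppos]
              refine ⟨by exact_mod_cast h4, by omega, ?_⟩
              have h6 : (((K+1):Nat):Int) ∣ (2 * (((K+1):Nat):Int)) := dvd_mul_left _ 2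
              exact dvd_sub h3 h6
        · rw [ihc, primesLe_succ, if_pos hp, List.map_append]
          rfl
      · rw [sieveBody, if_pos (by rw [hmemtest]; simpa using hp)]
        constructor
        · intro j
          rw [ihm]
          constructor
          · rintro ⟨q, hqp, hqle, h3, h4, h5⟩
            exact ⟨q, hqp, by omega, h3, h4, h5⟩
          · rintro ⟨q, hqp, hqle, h3, h4, h5⟩
            refine ⟨q, hqp, ?_, h3, h4, h5⟩
            rcases Nat.lt_or_ge q (K+1) with h6 | h6
            · omega
            · have : q = K+1 := by omega
              subst this
              exact absurd hqp hp
        · rw [ihc, primesLe_succ, if_neg hp, List.append_nil]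

-- ===== counting =====

lemma cntGe_eq (l : List Int) (t : Int) : cntGe l t = (l.countP (fun v => decide (t ≤ v)) : Int) := by
  rw [cntGe, PySem.List.foldl_ite_add_one]
  simp

lemma bisect_count (S : List Int) (hs : S.Pairwise (· ≤ ·)) (t : Int) :
    (S.length : Int) - (PySem.List.bisectLeft S t : Int) = (S.countP (fun v => decide (t ≤ v)) : Int) := by
  obtain ⟨hlen, hlt, hge⟩ := PySem.List.bisectLeft_spec S t hs
  set i := PySem.List.bisectLeft S t with hidef
  have hsplit : S = S.take i ++ S.drop i := (List.take_append_drop i S).symm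
  have h1 : (S.take i).countP (fun v => decide (t ≤ v)) = 0 := by
    rw [List.countP_eq_zero]
    intro v hv
    obtain ⟨j, hj, rfl⟩ := List.mem_iff_getElem.mp hv
    rw [List.length_take] at hj
    rw [List.getElem_take]
    simpa using not_le.mpr (hlt j (by omega) (by omega))
  have h2 : (S.drop i).countP (fun v => decide (t ≤ v)) = (S.drop i).length := by
    rw [List.countP_eq_length]
    intro v hv
    obtain ⟨j, hj, rfl⟩ := List.mem_iff_getElem.mp hv
    rw [List.length_drop] at hj
    rw [List.getElem_drop]
    simpa using hge (i + j) (by omega) (by omega)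
  calc (S.length : Int) - i
      = ((S.take i ++ S.drop i).countP (fun v => decide (t ≤ v)) : Int) := by
        rw [List.countP_append, h1, h2, List.length_drop]
        omega
    _ = _ := by rw [← hsplit]

lemma counts_eq (N : Nat) (h2 : 2 ≤ N) :
    ((PySem.List.pyRange 2 ((N:Int) + 1) 1).foldl (fun (st : PySem.Set Int × List Int) p =>
      if p ∈ st.1 then st
      else
        (((PySem.List.pyRange (2 * p) ((N:Int) + 1) p).foldl (fun s m => PySem.Set.add s m) st.1),
          st.2 ++ [legLoop ↑N p p 0 + 1])) (([] : PySem.Set Int), ([] : List Int))).2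
      = (primesLe N).map (fun q => (N.factorial.factorization q : Int) + 1) := by
  have h := (sieve_inv N N (by omega) le_rfl).2
  rw [show (fun (st : PySem.Set Int × List Int) p =>
      if p ∈ st.1 then st
      else
        (((PySem.List.pyRange (2 * p) ((N:Int) + 1) p).foldl (fun s m => PySem.Set.add s m) st.1),
          st.2 ++ [legLoop ↑N p p 0 + 1])) = sieveBody ↑N from rfl]
  rw [h]
  apply List.map_congr_left
  intro q hq
  rw [legLoop_eq q (mem_primesLe.mp hq).1 N (by omega)]

lemma solve_small (n : Int) (h : n < 2) : solve n = 0 := by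
  have hr : PySem.List.pyRange 2 (n + 1) 1 = [] := PySem.List.pyRange_one_eq_nil (by omega)
  rw [solve, FactD, hr]
  decide

lemma solve_big (N : Nat) (h2 : 2 ≤ N) : solve ((N:Nat) : Int) = solve_alt ((N:Nat) : Int) := by
  have hN1 : 1 ≤ N := by omega
  set C := (primesLe N).map (fun q => (N.factorial.factorization q : Int) + 1) with hCdef
  have hA := FactD_items N hN1
  have hkeysA : (FactD ↑N).keys = (primesLe N).map (fun (q:Nat) => (q:Int)) := by
    rw [keys_of_items hA, factItems, List.map_map]
    simp [Function.comp_def]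
  have hnodupA : (FactD ↑N).keys.Nodup := by
    rw [hkeysA]
    exact (nodup_primesLe N).map natCast_int_injective
  have hP : (FactD ((N:Nat) : Int)).keys.foldl
      (fun p a => p ++ [(FactD ((N:Nat) : Int)).getD a 0 + 1]) [] = C := by
    rw [PySem.List.foldl_append_singleton_eq_map, List.nil_append, hkeysA, List.map_map, hCdef]
    apply List.map_congr_left
    intro q hq
    simp only [Function.comp_def]
    congr 1
    exact PySem.Dict.getD_of_mem_items _ (by rw [hA]; exact List.mem_map_of_mem hq) hnodupA 0
  set S := PySem.List.sorted C (fun x => x) false with hSdef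
  have hpair : S.Pairwise (· ≤ ·) := PySem.List.sorted_pairwise C (fun x => x)
  have hperm : S.Perm C := PySem.List.sorted_perm C (fun x => x) false
  have hbis : ∀ t : Int, (PySem.List.len S : Int) - (PySem.List.bisectLeft S t : Int)
      = (C.countP (fun v => decide (t ≤ v)) : Int) := by
    intro t
    rw [PySem.List.len_eq, bisect_count S hpair t, hperm.countP_eq]
  simp only [solve, solve_alt, if_neg (show ¬ (((N:Nat) : Int) < 2) by omega)]
  rw [hP, ← hSdef, counts_eq N h2]
  rw [hbis 75, hbis 25, hbis 3, hbis 15, hbis 5]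
  simp only [cntGe_eq]
  ring

-- ===== VERDICT (by name: the statement is the Claim_ definition above) =====
theorem solve_spec : Claim_equal_solve := by
  intro n _
  unfold Spec_solve
  by_cases hn : n < 2
  · rw [solve_small n hn, solve_alt, if_pos hn]
  · have h0 : n = ((n.toNat : Nat) : Int) := by omega
    rw [h0]
    exact solve_big n.toNat (by omega)
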